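-- pv_equiv track=rewrite | github.com/PaxMakos/Terminal_Clobber | heuristics.py | heuristic_5
-- ===== SOURCE A (Python) =====
-- def heuristic_5(board, player):
--     player_score = 0
--     opponent_score = 0
--
--     for i in range(len(board)):
--         for j in range(len(board[0])):
--             if i > 0 and board[i-1][j] != 0:
--                 if board[i][j] == player:
--                     player_score += 1
--                 elif board[i][j] == -player:
--                     opponent_score += 1
--             if i < len(board)-1 and board[i+1][j] != 0:
--                 if board[i][j] == player:
--                     player_score += 1
--                 elif board[i][j] == -player:
--                     opponent_score += 1
--             if j > 0 and board[i][j-1] != 0: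
--                 if board[i][j] == player:
--                     player_score += 1
--                 elif board[i][j] == -player:
--                     opponent_score += 1
--             if j < len(board[0])-1 and board[i][j+1] != 0:
--                 if board[i][j] == player:
--                     player_score += 1
--                 elif board[i][j] == -player:
--                     opponent_score += 1
--             if i > 0 and j > 0 and board[i-1][j-1] != 0:
--                 if board[i][j] == player:
--                     player_score += 1
--                 elif board[i][j] == -player:
--                     opponent_score += 1
--             if i > 0 and j < len(board[0])-1 and board[i-1][j+1] != 0:
--                 if board[i][j] == player:
--                     player_score += 1
--                 elif board[i][j] == -player:
--                     opponent_score += 1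
--             if i < len(board)-1 and j > 0 and board[i+1][j-1] != 0:
--                 if board[i][j] == player:
--                     player_score += 1
--                 elif board[i][j] == -player:
--                     opponent_score += 1
--             if i < len(board)-1 and j < len(board[0])-1 and board[i+1][j+1] != 0:
--                 if board[i][j] == player:
--                     player_score += 1
--                 elif board[i][j] == -player:
--                     opponent_score += 1
--
--     return player_score - opponent_score
-- ===== SOURCE B (Python) =====
-- def heuristic_5(board, player):
--     # Staged passes (separable 3x3 convolution): build the 0/1 occupancy grid,
--     # then horizontal 3-window sums, then for each cell get its occupied-neighbor
--     # count from three vertical window entries minus the center, and weight it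
--     # by the cell's owner sign.
--     m = len(board)
--     if m == 0:
--         return 0
--     n = len(board[0])
--     occ = [[1 if board[i][j] != 0 else 0 for j in range(n)] for i in range(m)]
--     rs = [[(occ[i][j - 1] if j > 0 else 0) + occ[i][j] + (occ[i][j + 1] if j < n - 1 else 0)
--            for j in range(n)] for i in range(m)]
--     total = 0
--     for i in range(m):
--         for j in range(n):
--             nb = (rs[i - 1][j] if i > 0 else 0) + rs[i][j] + (rs[i + 1][j] if i < m - 1 else 0) - occ[i][j]
--             v = board[i][j]
--             if v == player:
--                 total += nb
--             elif v == -player: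
--                 total -= nb
--     return total
-- ===== Notes on version B (the rewrite author's own statement) =====
-- stated objective: alternative
-- what changed: Replaces A's one pass with eight per-cell guarded neighbor checks and two counters by three staged passes of a separable 3x3 convolution: build a 0/1 occupancy grid, then horizontal 3-window sums, then read each cell's occupied-neighbor count from three vertical entries minus the center and weight it by the cell's owner sign.
import Mathlib
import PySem

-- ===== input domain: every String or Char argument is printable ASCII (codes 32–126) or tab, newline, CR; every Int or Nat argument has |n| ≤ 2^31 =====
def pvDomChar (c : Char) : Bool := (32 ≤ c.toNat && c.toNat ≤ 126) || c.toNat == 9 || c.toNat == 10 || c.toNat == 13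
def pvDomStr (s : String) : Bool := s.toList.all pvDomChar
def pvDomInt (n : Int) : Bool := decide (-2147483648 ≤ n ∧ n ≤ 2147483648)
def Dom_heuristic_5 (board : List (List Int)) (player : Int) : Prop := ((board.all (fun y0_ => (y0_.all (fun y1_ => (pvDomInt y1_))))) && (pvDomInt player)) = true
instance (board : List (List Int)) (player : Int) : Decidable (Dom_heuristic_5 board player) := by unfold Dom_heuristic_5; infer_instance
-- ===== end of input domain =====

-- B replaces A's single pass of eight guarded per-cell neighbor checks with two
-- counters by three staged passes (separable 3x3 convolution): an occupancy
-- grid, horizontal 3-window sums, then a signed weighted total (objective: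
-- alternative, same asymptotic cost).

-- ===== PORT A =====
-- board[x][y] under A's guards is always in range on Pre_, so pyGetD is exact there.
def pvCellA (board : List (List Int)) (x y : Int) : Int :=
  PySem.List.pyGetD (PySem.List.pyGetD board x []) y 0

def pvBump (player cell : Int) (a : Int × Int) : Int × Int :=
  if cell = player then (a.1 + 1, a.2)
  else if cell = -player then (a.1, a.2 + 1)
  else a

-- the body of A's inner loop (the eight guarded neighbor checks)
def pvStepA (board : List (List Int)) (player i j : Int) (acc : Int × Int) : Int × Int :=
  let m : Int := board.length
  let n : Int := (PySem.List.pyGetD board 0 []).length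
  let bump := pvBump player (pvCellA board i j)
  let acc := if i > 0 ∧ pvCellA board (i-1) j ≠ 0 then bump acc else acc
  let acc := if i < m - 1 ∧ pvCellA board (i+1) j ≠ 0 then bump acc else acc
  let acc := if j > 0 ∧ pvCellA board i (j-1) ≠ 0 then bump acc else acc
  let acc := if j < n - 1 ∧ pvCellA board i (j+1) ≠ 0 then bump acc else acc
  let acc := if i > 0 ∧ j > 0 ∧ pvCellA board (i-1) (j-1) ≠ 0 then bump acc else acc
  let acc := if i > 0 ∧ j < n - 1 ∧ pvCellA board (i-1) (j+1) ≠ 0 then bump acc else acc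
  let acc := if i < m - 1 ∧ j > 0 ∧ pvCellA board (i+1) (j-1) ≠ 0 then bump acc else acc
  let acc := if i < m - 1 ∧ j < n - 1 ∧ pvCellA board (i+1) (j+1) ≠ 0 then bump acc else acc
  acc

def heuristic_5 (board : List (List Int)) (player : Int) : Int :=
  let r :=
    (PySem.List.pyRange 0 board.length 1).foldl (fun (acc : Int × Int) i =>
      (PySem.List.pyRange 0 ((PySem.List.pyGetD board 0 []).length) 1).foldl
        (fun (acc : Int × Int) j => pvStepA board player i j acc) acc)
      ((0 : Int), (0 : Int))
  r.1 - r.2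

-- ===== PORT B =====
-- pass 1: the 0/1 occupancy grid
def pvOccGrid (board : List (List Int)) : List (List Int) :=
  (PySem.List.pyRange 0 board.length 1).map (fun i =>
    (PySem.List.pyRange 0 ((PySem.List.pyGetD board 0 []).length) 1).map (fun j =>
      if pvCellA board i j ≠ 0 then (1 : Int) else 0))

-- pass 2: horizontal 3-window sums of the occupancy grid
def pvRsGrid (board : List (List Int)) : List (List Int) :=
  let occ := pvOccGrid board
  let n : Int := (PySem.List.pyGetD board 0 []).length
  (PySem.List.pyRange 0 board.length 1).map (fun i =>
    (PySem.List.pyRange 0 n 1).map (fun j =>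
      (if j > 0 then pvCellA occ i (j-1) else 0) + pvCellA occ i j +
      (if j < n - 1 then pvCellA occ i (j+1) else 0)))

-- pass 3: vertical 3-window of rs minus the center gives the occupied-neighbor
-- count; weight it by the cell's owner sign.
def heuristic_5_alt (board : List (List Int)) (player : Int) : Int :=
  let m : Int := board.length
  if m = 0 then 0 else
  let n : Int := (PySem.List.pyGetD board 0 []).length
  let occ := pvOccGrid board
  let rs := pvRsGrid board
  (PySem.List.pyRange 0 m 1).foldl (fun (total : Int) i =>
    (PySem.List.pyRange 0 n 1).foldl (fun (total : Int) j =>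
      let nb := (if i > 0 then pvCellA rs (i-1) j else 0) + pvCellA rs i j +
                (if i < m - 1 then pvCellA rs (i+1) j else 0) - pvCellA occ i j
      let v := pvCellA board i j
      if v = player then total + nb
      else if v = -player then total - nb
      else total) total) 0

-- ===== PRECONDITION & SPEC =====
-- Pre_ excludes exactly the ragged boards on which Python's A raises IndexError
-- (a row shorter than row 0; A probes every row at every column below len(board[0])).
def Pre_heuristic_5 (board : List (List Int)) (player : Int) : Prop :=
  ∀ row ∈ board, (board.headD []).length ≤ row.length
instance (board : List (List Int)) (player : Int) : Decidable (Pre_heuristic_5 board player) := by unfold Pre_heuristic_5; infer_instance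

def pvWitness_heuristic_5 : List (List Int) × Int := ([[1, -1], [0, 1]], 1)

def Spec_heuristic_5 (board : List (List Int)) (player : Int) (out : Int) : Prop := out = heuristic_5_alt board player
instance (board : List (List Int)) (player : Int) (out : Int) : Decidable (Spec_heuristic_5 board player out) := by unfold Spec_heuristic_5; infer_instance

-- ===== CLAIM (what is proved, stated in full; the proofs are below) =====
def Claim_equal_heuristic_5 : Prop := ∀ (board : List (List Int)) (player : Int), Dom_heuristic_5 board player → Pre_heuristic_5 board player → Spec_heuristic_5 board player (heuristic_5 board player)

-- ===== LEMMAS AND PROOFS =====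

-- the sign a cell contributes for `player`
def pvS (player v : Int) : Int := if v = player then 1 else if v = -player then -1 else 0

-- 1 iff (i,j) is in bounds and occupied, else 0
def pvE (board : List (List Int)) (m n i j : Int) : Int :=
  if (0 ≤ i ∧ i < m ∧ 0 ≤ j ∧ j < n) ∧ pvCellA board i j ≠ 0 then 1 else 0

-- the number of in-bounds occupied neighbors of (i,j)
def pvNb (board : List (List Int)) (m n i j : Int) : Int :=
  pvE board m n (i-1) j + pvE board m n (i+1) j +
  pvE board m n i (j-1) + pvE board m n i (j+1) +
  pvE board m n (i-1) (j-1) + pvE board m n (i-1) (j+1) +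
  pvE board m n (i+1) (j-1) + pvE board m n (i+1) (j+1)

lemma pv_bump_diff (player cell : Int) (a : Int × Int) :
    (pvBump player cell a).1 - (pvBump player cell a).2 = a.1 - a.2 + pvS player cell := by
  unfold pvBump pvS
  split_ifs <;> simp <;> ring

lemma pv_step_diff (player cell : Int) (cond : Prop) [Decidable cond] (a : Int × Int) :
    (if cond then pvBump player cell a else a).1 - (if cond then pvBump player cell a else a).2
      = a.1 - a.2 + if cond then pvS player cell else 0 := by
  split_ifs with h
  · exact pv_bump_diff player cell a
  · ring

lemma pv_foldl_pair {α : Type} (l : List α) (f : (Int × Int) → α → (Int × Int)) (g : α → Int) :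
    (∀ acc x, x ∈ l → (f acc x).1 - (f acc x).2 = acc.1 - acc.2 + g x) →
    ∀ acc, (l.foldl f acc).1 - (l.foldl f acc).2 = acc.1 - acc.2 + (l.map g).sum := by
  induction l with
  | nil => intro _ acc; simp
  | cons a t ih =>
    intro h acc
    simp only [List.foldl_cons, List.map_cons, List.sum_cons]
    rw [ih (fun acc x hx => h acc x (List.mem_cons_of_mem a hx)) (f acc a),
        h acc a (List.mem_cons_self)]
    ring

lemma pv_foldl_int {α : Type} (l : List α) (f : Int → α → Int) (g : α → Int) :
    (∀ acc x, x ∈ l → f acc x = acc + g x) →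
    ∀ acc, l.foldl f acc = acc + (l.map g).sum := by
  induction l with
  | nil => intro _ acc; simp
  | cons a t ih =>
    intro h acc
    simp only [List.foldl_cons, List.map_cons, List.sum_cons]
    rw [ih (fun acc x hx => h acc x (List.mem_cons_of_mem a hx)) (f acc a),
        h acc a (List.mem_cons_self)]
    ring

-- one of A's guarded checks contributes pvS times the neighbor's pvE value
lemma pv_term_eq (board : List (List Int)) (player m n p1 p2 c : Int)
    (C : Prop) [Decidable C]
    (hC : C ↔ ((0 ≤ p1 ∧ p1 < m ∧ 0 ≤ p2 ∧ p2 < n) ∧ pvCellA board p1 p2 ≠ 0)) :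
    (if C then pvS player c else 0) = pvS player c * pvE board m n p1 p2 := by
  unfold pvE
  rw [if_congr hC rfl rfl]
  split_ifs <;> ring

-- A's eight guarded checks at an in-range cell contribute pvS * pvNb
lemma pv_cell_contrib_A (board : List (List Int)) (player : Int) (i j : Int)
    (hi0 : 0 ≤ i) (him : i < (board.length : Int))
    (hj0 : 0 ≤ j) (hjn : j < ((PySem.List.pyGetD board 0 []).length : Int))
    (acc : Int × Int) :
    (pvStepA board player i j acc).1 - (pvStepA board player i j acc).2
      = acc.1 - acc.2 + pvS player (pvCellA board i j) *
          pvNb board (board.length) ((PySem.List.pyGetD board 0 []).length) i j := by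
  simp only [pvStepA, pv_step_diff]
  set m : Int := (board.length : Int) with hm
  set n : Int := ((PySem.List.pyGetD board 0 []).length : Int) with hn
  rw [pv_term_eq board player m n (i-1) j _ _
        (by constructor
            · rintro ⟨h1, hc⟩; exact ⟨⟨by omega, by omega, hj0, hjn⟩, hc⟩
            · rintro ⟨⟨a, b, c, d⟩, hc⟩; exact ⟨by omega, hc⟩),
      pv_term_eq board player m n (i+1) j _ _
        (by constructor
            · rintro ⟨h1, hc⟩; exact ⟨⟨by omega, by omega, hj0, hjn⟩, hc⟩
            · rintro ⟨⟨a, b, c, d⟩, hc⟩; exact ⟨by omega, hc⟩),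
      pv_term_eq board player m n i (j-1) _ _
        (by constructor
            · rintro ⟨h1, hc⟩; exact ⟨⟨hi0, him, by omega, by omega⟩, hc⟩
            · rintro ⟨⟨a, b, c, d⟩, hc⟩; exact ⟨by omega, hc⟩),
      pv_term_eq board player m n i (j+1) _ _
        (by constructor
            · rintro ⟨h1, hc⟩; exact ⟨⟨hi0, him, by omega, by omega⟩, hc⟩
            · rintro ⟨⟨a, b, c, d⟩, hc⟩; exact ⟨by omega, hc⟩),
      pv_term_eq board player m n (i-1) (j-1) _ _
        (by constructor
            · rintro ⟨h1, h2, hc⟩; exact ⟨⟨by omega, by omega, by omega, by omega⟩, hc⟩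
            · rintro ⟨⟨a, b, c, d⟩, hc⟩; exact ⟨by omega, by omega, hc⟩),
      pv_term_eq board player m n (i-1) (j+1) _ _
        (by constructor
            · rintro ⟨h1, h2, hc⟩; exact ⟨⟨by omega, by omega, by omega, by omega⟩, hc⟩
            · rintro ⟨⟨a, b, c, d⟩, hc⟩; exact ⟨by omega, by omega, hc⟩),
      pv_term_eq board player m n (i+1) (j-1) _ _
        (by constructor
            · rintro ⟨h1, h2, hc⟩; exact ⟨⟨by omega, by omega, by omega, by omega⟩, hc⟩
            · rintro ⟨⟨a, b, c, d⟩, hc⟩; exact ⟨by omega, by omega, hc⟩),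
      pv_term_eq board player m n (i+1) (j+1) _ _
        (by constructor
            · rintro ⟨h1, h2, hc⟩; exact ⟨⟨by omega, by omega, by omega, by omega⟩, hc⟩
            · rintro ⟨⟨a, b, c, d⟩, hc⟩; exact ⟨by omega, by omega, hc⟩)]
  unfold pvNb
  ring

-- reading the occupancy grid at an in-range cell
lemma pv_occ_get (board : List (List Int)) (i j : Int)
    (hi0 : 0 ≤ i) (him : i < (board.length : Int))
    (hj0 : 0 ≤ j) (hjn : j < ((PySem.List.pyGetD board 0 []).length : Int)) :
    pvCellA (pvOccGrid board) i j = if pvCellA board i j ≠ 0 then 1 else 0 := by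
  unfold pvOccGrid pvCellA
  rw [PySem.List.pyGetD_map_pyRange_of_nonneg _ _ _ _ hi0 him,
      PySem.List.pyGetD_map_pyRange_of_nonneg _ _ _ _ hj0 hjn]

-- the occupancy grid entry equals pvE at in-range cells
lemma pv_occ_eq_E (board : List (List Int)) (i j : Int)
    (hi0 : 0 ≤ i) (him : i < (board.length : Int))
    (hj0 : 0 ≤ j) (hjn : j < ((PySem.List.pyGetD board 0 []).length : Int)) :
    pvCellA (pvOccGrid board) i j
      = pvE board (board.length) ((PySem.List.pyGetD board 0 []).length) i j := by
  rw [pv_occ_get board i j hi0 him hj0 hjn]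
  unfold pvE
  by_cases h : pvCellA board i j ≠ 0
  · rw [if_pos h, if_pos ⟨⟨hi0, him, hj0, hjn⟩, h⟩]
  · rw [if_neg h, if_neg (by rintro ⟨_, hc⟩; exact h hc)]

-- pvE is 0 out of bounds
lemma pv_E_oob (board : List (List Int)) (m n i j : Int)
    (h : ¬ (0 ≤ i ∧ i < m ∧ 0 ≤ j ∧ j < n)) : pvE board m n i j = 0 := by
  unfold pvE
  rw [if_neg (by rintro ⟨hb, _⟩; exact h hb)]

-- reading the rs grid at an in-range cell: three horizontal pvE terms
lemma pv_rs_get (board : List (List Int)) (i j : Int)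
    (hi0 : 0 ≤ i) (him : i < (board.length : Int))
    (hj0 : 0 ≤ j) (hjn : j < ((PySem.List.pyGetD board 0 []).length : Int)) :
    pvCellA (pvRsGrid board) i j
      = pvE board (board.length) ((PySem.List.pyGetD board 0 []).length) i (j-1)
        + pvE board (board.length) ((PySem.List.pyGetD board 0 []).length) i j
        + pvE board (board.length) ((PySem.List.pyGetD board 0 []).length) i (j+1) := by
  set m : Int := (board.length : Int) with hm
  set n : Int := ((PySem.List.pyGetD board 0 []).length : Int) with hn
  have : pvCellA (pvRsGrid board) i j
      = (if j > 0 then pvCellA (pvOccGrid board) i (j-1) else 0)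
        + pvCellA (pvOccGrid board) i j
        + (if j < n - 1 then pvCellA (pvOccGrid board) i (j+1) else 0) := by
    unfold pvRsGrid pvCellA
    rw [PySem.List.pyGetD_map_pyRange_of_nonneg _ _ _ _ hi0 him,
        PySem.List.pyGetD_map_pyRange_of_nonneg _ _ _ _ hj0 hjn]
  have hl : (if j > 0 then pvCellA (pvOccGrid board) i (j-1) else 0) = pvE board m n i (j-1) := by
    by_cases h : j > 0
    · rw [if_pos h, pv_occ_eq_E board i (j-1) hi0 him (by omega) (by omega)]
    · rw [if_neg h, pv_E_oob board m n i (j-1) (by omega)]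
  have hr : (if j < n - 1 then pvCellA (pvOccGrid board) i (j+1) else 0) = pvE board m n i (j+1) := by
    by_cases h : j < n - 1
    · rw [if_pos h, pv_occ_eq_E board i (j+1) hi0 him (by omega) (by omega)]
    · rw [if_neg h, pv_E_oob board m n i (j+1) (by omega)]
  rw [this, hl, hr, pv_occ_eq_E board i j hi0 him hj0 hjn]

-- B's per-cell step at an in-range cell adds pvS * pvNb
lemma pv_cell_contrib_B (board : List (List Int)) (player : Int) (i j : Int)
    (hi0 : 0 ≤ i) (him : i < (board.length : Int))
    (hj0 : 0 ≤ j) (hjn : j < ((PySem.List.pyGetD board 0 []).length : Int))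
    (total : Int) :
    (let nb := (if i > 0 then pvCellA (pvRsGrid board) (i-1) j else 0)
                + pvCellA (pvRsGrid board) i j
                + (if i < (board.length : Int) - 1 then pvCellA (pvRsGrid board) (i+1) j else 0)
                - pvCellA (pvOccGrid board) i j
     let v := pvCellA board i j
     if v = player then total + nb
     else if v = -player then total - nb
     else total)
      = total + pvS player (pvCellA board i j) *
          pvNb board (board.length) ((PySem.List.pyGetD board 0 []).length) i j := by
  set m : Int := (board.length : Int) with hm
  set n : Int := ((PySem.List.pyGetD board 0 []).length : Int) with hn
  have hnb : (if i > 0 then pvCellA (pvRsGrid board) (i-1) j else 0)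
                + pvCellA (pvRsGrid board) i j
                + (if i < m - 1 then pvCellA (pvRsGrid board) (i+1) j else 0)
                - pvCellA (pvOccGrid board) i j
      = pvNb board m n i j := by
    have h1 : (if i > 0 then pvCellA (pvRsGrid board) (i-1) j else 0)
        = pvE board m n (i-1) (j-1) + pvE board m n (i-1) j + pvE board m n (i-1) (j+1) := by
      by_cases h : i > 0
      · rw [if_pos h, pv_rs_get board (i-1) j (by omega) (by omega) hj0 hjn]
      · rw [if_neg h, pv_E_oob board m n (i-1) (j-1) (by omega),
            pv_E_oob board m n (i-1) j (by omega), pv_E_oob board m n (i-1) (j+1) (by omega)]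
        ring
    have h2 := pv_rs_get board i j hi0 him hj0 hjn
    have h3 : (if i < m - 1 then pvCellA (pvRsGrid board) (i+1) j else 0)
        = pvE board m n (i+1) (j-1) + pvE board m n (i+1) j + pvE board m n (i+1) (j+1) := by
      by_cases h : i < m - 1
      · rw [if_pos h, pv_rs_get board (i+1) j (by omega) (by omega) hj0 hjn]
      · rw [if_neg h, pv_E_oob board m n (i+1) (j-1) (by omega),
            pv_E_oob board m n (i+1) j (by omega), pv_E_oob board m n (i+1) (j+1) (by omega)]
        ring
    rw [h1, h2, h3, pv_occ_eq_E board i j hi0 him hj0 hjn]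
    unfold pvNb
    ring
  simp only [hnb]
  unfold pvS
  split_ifs <;> ring

-- both ports compute the sum of pvS * pvNb over all cells
lemma pv_A_eq_sum (board : List (List Int)) (player : Int) :
    heuristic_5 board player
      = ((PySem.List.pyRange 0 board.length 1).map (fun i =>
          ((PySem.List.pyRange 0 ((PySem.List.pyGetD board 0 []).length) 1).map (fun j =>
            pvS player (pvCellA board i j) *
              pvNb board (board.length) ((PySem.List.pyGetD board 0 []).length) i j)).sum)).sum := by
  unfold heuristic_5
  rw [pv_foldl_pair (PySem.List.pyRange 0 (board.length : Int) 1)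
      (fun acc i => (PySem.List.pyRange 0 ((PySem.List.pyGetD board 0 []).length : Int) 1).foldl
        (fun (acc : Int × Int) j => pvStepA board player i j acc) acc)
      (fun i => ((PySem.List.pyRange 0 ((PySem.List.pyGetD board 0 []).length : Int) 1).map
        (fun j => pvS player (pvCellA board i j) *
          pvNb board (board.length) ((PySem.List.pyGetD board 0 []).length) i j)).sum)
      (fun acc i hi => by
        have hib := (PySem.List.mem_pyRange_one).mp hi
        exact pv_foldl_pair _ _ _
          (fun acc j hj => by
            have hjb := (PySem.List.mem_pyRange_one).mp hj
            exact pv_cell_contrib_A board player i j hib.1 hib.2 hjb.1 hjb.2 acc) acc)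
      ((0 : Int), (0 : Int))]
  simp

lemma pv_B_eq_sum (board : List (List Int)) (player : Int) (hm : board.length ≠ 0) :
    heuristic_5_alt board player
      = ((PySem.List.pyRange 0 board.length 1).map (fun i =>
          ((PySem.List.pyRange 0 ((PySem.List.pyGetD board 0 []).length) 1).map (fun j =>
            pvS player (pvCellA board i j) *
              pvNb board (board.length) ((PySem.List.pyGetD board 0 []).length) i j)).sum)).sum := by
  unfold heuristic_5_alt
  rw [if_neg (by exact_mod_cast hm)]
  rw [pv_foldl_int (PySem.List.pyRange 0 (board.length : Int) 1) _
      (fun i => ((PySem.List.pyRange 0 ((PySem.List.pyGetD board 0 []).length : Int) 1).map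
        (fun j => pvS player (pvCellA board i j) *
          pvNb board (board.length) ((PySem.List.pyGetD board 0 []).length) i j)).sum)
      (fun total i hi => by
        have hib := (PySem.List.mem_pyRange_one).mp hi
        exact pv_foldl_int _ _ _
          (fun total j hj => by
            have hjb := (PySem.List.mem_pyRange_one).mp hj
            exact pv_cell_contrib_B board player i j hib.1 hib.2 hjb.1 hjb.2 total) total)
      0]
  ring

-- ===== VERDICT (by name: the statement is the Claim_ definition above) =====
theorem heuristic_5_spec : Claim_equal_heuristic_5 := by
  intro board player _ _
  unfold Spec_heuristic_5
  by_cases hm : board.length = 0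
  · have hb : board = [] := List.eq_nil_of_length_eq_zero hm
    subst hb
    rfl
  · rw [pv_A_eq_sum, pv_B_eq_sum board player hm]
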